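-- pv_equiv track=rewrite | github.com/mcraig567/AoC | 2021/Day_18/18-a.py | get_full_right_number
-- ===== SOURCE A (Python) =====
-- def get_full_right_number(full_string, index):
-- 	number = []
-- 	for i in range(index, len(full_string)):
-- 		if full_string[i] not in ["[", "]", ","]:
-- 			number.append(full_string[i])
-- 		else:
-- 			return "".join(number)
--
-- 	return ''.join(number)
-- ===== SOURCE B (Python) =====
-- def get_full_right_number(full_string, index):
-- 	tail = full_string[index:]
-- 	end = len(tail)
-- 	for d in "[],":
-- 		pos = tail.find(d)
-- 		if pos != -1:
-- 			end = min(end, pos)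
-- 	return tail[:end]
-- ===== Notes on version B (the rewrite author's own statement) =====
-- stated objective: alternative
-- what changed: B replaces A's per-character scan-and-append loop by computing the cut position directly: it slices the tail once, takes the minimum of the C-level str.find positions of the three delimiters, and returns one slice.
-- intended difference: For negative index on a string whose wrapped suffix s[index:] contains no delimiter and whose first character is not a delimiter, A's per-character negative indexing wraps past -1 back to the start and re-reads the string's prefix (e.g. A('ab',-2)='abab'), while B returns just the suffix 'ab', the intended Python slice reading of a negative start. — e.g. on get_full_right_number("ab", -2): A returns "abab", B returns "ab"
import Mathlib
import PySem

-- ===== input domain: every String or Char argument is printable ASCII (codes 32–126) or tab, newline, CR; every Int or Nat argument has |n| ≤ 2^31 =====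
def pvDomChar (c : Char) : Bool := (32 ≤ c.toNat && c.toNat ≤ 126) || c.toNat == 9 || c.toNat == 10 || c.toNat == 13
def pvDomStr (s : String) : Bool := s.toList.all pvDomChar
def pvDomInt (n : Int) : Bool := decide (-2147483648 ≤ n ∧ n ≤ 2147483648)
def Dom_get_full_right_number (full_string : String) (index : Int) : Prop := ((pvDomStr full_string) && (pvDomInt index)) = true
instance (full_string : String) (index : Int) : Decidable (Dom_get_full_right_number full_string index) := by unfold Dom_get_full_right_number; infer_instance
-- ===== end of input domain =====

-- B computes the cut position with min over delimiter finds and returns one slice, instead of A's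
-- per-character scan-and-append loop (objective: alternative; a timing run measured B faster).

-- ===== PORT A =====
-- the loop 'for i in range(index, len(full_string))' with early return; pyGet? none = IndexError (A raises there)
def goA (cs : List Char) (i : Int) (number : List Char) : String :=
  if _h : i < (cs.length : Int) then
    match PySem.List.pyGet? cs i with
    | none => String.ofList number      -- IndexError in Python; unreachable under Pre_
    | some c =>
      if c ∈ ['[', ']', ','] then String.ofList number
      else goA cs (i + 1) (number ++ [c])
  else String.ofList number
termination_by ((cs.length : Int) - i).toNat
decreasing_by omega

def get_full_right_number (full_string : String) (index : Int) : String :=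
  goA full_string.toList index []

-- ===== PORT B =====
def get_full_right_number_alt (full_string : String) (index : Int) : String :=
  let tail := PySem.List.slice full_string.toList (some index) none      -- full_string[index:]
  let e0 : Int := tail.length                                           -- end = len(tail)
  let e := ['[', ']', ','].foldl                                        -- for d in "[],": pos = tail.find(d); if pos != -1: end = min(end, pos)
      (fun e d => let pos := PySem.Chars.find tail [d]
                  if pos ≠ -1 then min e pos else e) e0
  String.ofList (PySem.List.slice tail none (some e))                       -- tail[:end]

-- ===== PRECONDITION & SPEC =====
def isDelim (c : Char) : Bool := c = '[' || c = ']' || c = ','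

-- Pre_ excludes exactly the inputs where A raises IndexError: index below -len(full_string).
def Pre_get_full_right_number (full_string : String) (index : Int) : Prop :=
  -(full_string.toList.length : Int) ≤ index
instance (full_string : String) (index : Int) : Decidable (Pre_get_full_right_number full_string index) := by
  unfold Pre_get_full_right_number; infer_instance

def pvWitness_get_full_right_number : String × Int := ("[1,23]", 4)

-- For negative index on a string whose wrapped suffix contains no delimiter and whose first character
-- is not a delimiter, A's per-character negative indexing wraps past -1 back to the start and re-reads
-- the prefix (A "ab" (-2) = "abab"), while B returns just the suffix "ab", the intended slice reading.
def D_get_full_right_number (full_string : String) (index : Int) : Prop :=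
  index < 0 ∧ full_string.toList ≠ [] ∧ isDelim full_string.toList.headI = false ∧
    (full_string.toList.drop (full_string.toList.length + index).toNat).all (fun c => !isDelim c) = true
instance (full_string : String) (index : Int) : Decidable (D_get_full_right_number full_string index) := by
  unfold D_get_full_right_number; infer_instance

def Spec_get_full_right_number (full_string : String) (index : Int) (out : String) : Prop :=
  ¬ D_get_full_right_number full_string index → out = get_full_right_number_alt full_string index
instance (full_string : String) (index : Int) (out : String) : Decidable (Spec_get_full_right_number full_string index out) := by
  unfold Spec_get_full_right_number; infer_instance

def pvDiffWitness_get_full_right_number : String × Int := ("ab", -2)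
def pvDiffWitnessOut_get_full_right_number : String × String := ("abab", "ab")

-- ===== CLAIM (what is proved, stated in full; the proofs are below) =====
def Claim_unchanged_get_full_right_number : Prop := ∀ (full_string : String) (index : Int), Dom_get_full_right_number full_string index → Pre_get_full_right_number full_string index → Spec_get_full_right_number full_string index (get_full_right_number full_string index)
def Claim_changed_get_full_right_number : Prop := Dom_get_full_right_number (pvDiffWitness_get_full_right_number.1) (pvDiffWitness_get_full_right_number.2) ∧ Pre_get_full_right_number (pvDiffWitness_get_full_right_number.1) (pvDiffWitness_get_full_right_number.2) ∧ D_get_full_right_number (pvDiffWitness_get_full_right_number.1) (pvDiffWitness_get_full_right_number.2) ∧ get_full_right_number (pvDiffWitness_get_full_right_number.1) (pvDiffWitness_get_full_right_number.2) = pvDiffWitnessOut_get_full_right_number.1 ∧ get_full_right_number_alt (pvDiffWitness_get_full_right_number.1) (pvDiffWitness_get_full_right_number.2) = pvDiffWitnessOut_get_full_right_number.2 ∧ pvDiffWitnessOut_get_full_right_number.1 ≠ pvDiffWitnessOut_get_full_right_number.2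
def Claim_exact_get_full_right_number : Prop := ∀ (full_string : String) (index : Int), Dom_get_full_right_number full_string index → Pre_get_full_right_number full_string index → D_get_full_right_number full_string index → get_full_right_number full_string index ≠ get_full_right_number_alt full_string index

-- ===== LEMMAS AND PROOFS =====

theorem singleton_prefix_iff (d : Char) (u : List Char) : [d] <+: u ↔ u.head? = some d := by
  cases u with
  | nil => simp
  | cons a u' => simp [List.cons_prefix_iff, eq_comm]

theorem find_single (t : List Char) (d : Char) (h : 0 ≤ PySem.Chars.find t [d]) :
    t[(PySem.Chars.find t [d]).toNat]? = some d ∧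
      ∀ i < (PySem.Chars.find t [d]).toNat, t[i]? ≠ some d := by
  obtain ⟨h1, h2⟩ := PySem.Chars.find_spec h
  rw [singleton_prefix_iff] at h1
  rw [List.head?_eq_getElem?, List.getElem?_drop] at h1
  refine ⟨by simpa using h1, fun i hi hc => ?_⟩
  have := h2 i hi
  rw [singleton_prefix_iff, List.head?_eq_getElem?, List.getElem?_drop] at this
  simp at this
  exact this hc

theorem find_single_neg (t : List Char) (d : Char) : PySem.Chars.find t [d] = -1 ↔ d ∉ t := by
  rw [PySem.Chars.find_eq_neg_one_iff, List.singleton_infix_iff]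

theorem find_key (t : List Char) (d : Char) (hd : isDelim d = true) :
    PySem.Chars.find t [d] = -1 ∨
      ((t.findIdx isDelim : Int) ≤ PySem.Chars.find t [d] ∧ PySem.Chars.find t [d] ≤ (t.length : Int)) := by
  by_cases h : PySem.Chars.find t [d] = -1
  · exact Or.inl h
  · have h0 : 0 ≤ PySem.Chars.find t [d] := by
      have := PySem.Chars.neg_one_le_find t [d]; omega
    obtain ⟨h1, _⟩ := find_single t d h0
    right
    refine ⟨?_, PySem.Chars.find_le_length t [d]⟩
    by_contra hlt
    push_neg at hlt
    have hlt' : (PySem.Chars.find t [d]).toNat < t.findIdx isDelim := by omega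
    have := List.not_of_lt_findIdx hlt'
    have hlen : (PySem.Chars.find t [d]).toNat < t.length := by
      have := List.findIdx_le_length (p := isDelim) (xs := t); omega
    rw [List.getElem?_eq_getElem hlen] at h1
    simp at h1
    have hdd : isDelim d = false := by rw [← h1]; exact this
    rw [hd] at hdd
    simp at hdd

theorem find_hit (t : List Char) (d : Char) (hj : t.findIdx isDelim < t.length)
    (hget : t[t.findIdx isDelim]'hj = d) :
    0 ≤ PySem.Chars.find t [d] ∧ PySem.Chars.find t [d] ≤ (t.findIdx isDelim : Int) := by
  have hmem : d ∈ t := hget ▸ List.getElem_mem hj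
  have hne : PySem.Chars.find t [d] ≠ -1 := fun hc => (by
    rw [find_single_neg] at hc; exact hc hmem)
  have h0 : 0 ≤ PySem.Chars.find t [d] := by
    have := PySem.Chars.neg_one_le_find t [d]; omega
  obtain ⟨_, h2⟩ := find_single t d h0
  refine ⟨h0, ?_⟩
  by_contra hlt
  push_neg at hlt
  have : t.findIdx isDelim < (PySem.Chars.find t [d]).toNat := by omega
  exact h2 _ this (by rw [List.getElem?_eq_getElem hj]; simp [hget])

theorem fold_eq_findIdx (t : List Char) :
    (['[', ']', ','].foldl
      (fun e d => let pos := PySem.Chars.find t [d]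
                  if pos ≠ -1 then min e pos else e) (t.length : Int))
    = (t.findIdx isDelim : Int) := by
  have hjlen := List.findIdx_le_length (p := isDelim) (xs := t)
  have k1 := find_key t '[' (by decide)
  have k2 := find_key t ']' (by decide)
  have k3 := find_key t ',' (by decide)
  simp only [List.foldl]
  by_cases hj : t.findIdx isDelim < t.length
  · have hdel : isDelim (t[t.findIdx isDelim]'hj) = true := List.findIdx_getElem
    have : t[t.findIdx isDelim]'hj = '[' ∨ t[t.findIdx isDelim]'hj = ']' ∨ t[t.findIdx isDelim]'hj = ',' := by
      revert hdel; simp [isDelim]; tauto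
    rcases this with h | h | h
    · obtain ⟨ha, hb⟩ := find_hit t '[' hj h
      split_ifs <;> omega
    · obtain ⟨ha, hb⟩ := find_hit t ']' hj h
      split_ifs <;> omega
    · obtain ⟨ha, hb⟩ := find_hit t ',' hj h
      split_ifs <;> omega
  · have hj' : t.findIdx isDelim = t.length := by omega
    split_ifs <;> omega

theorem tw_eq_take_findIdx (t : List Char) :
    t.takeWhile (fun c => !isDelim c) = t.take (t.findIdx isDelim) := by
  induction t with
  | nil => rfl
  | cons c t ih =>
    by_cases h : isDelim c = true
    · simp [List.findIdx_cons, h]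
    · simp only [Bool.not_eq_true] at h
      simp [List.findIdx_cons, h, ih]

-- B computes takeWhile-not-delim of the tail slice
theorem altEq (s : String) (index : Int) :
    get_full_right_number_alt s index =
      String.ofList ((PySem.List.slice s.toList (some index) none).takeWhile (fun c => !isDelim c)) := by
  unfold get_full_right_number_alt
  simp only [fold_eq_findIdx]
  have h := PySem.List.slice_to (xs := PySem.List.slice s.toList (some index) none)
    (b := (((PySem.List.slice s.toList (some index) none).findIdx isDelim : Nat) : Int)) (by positivity)
  rw [h, Int.toNat_natCast, tw_eq_take_findIdx]

theorem mem_delims_iff (c : Char) : c ∈ ['[', ']', ','] ↔ isDelim c = true := by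
  simp [isDelim]; tauto

-- A's loop from a nonnegative position k
theorem goA_nonneg (cs : List Char) (k : Nat) (acc : List Char) :
    goA cs (k : Int) acc = String.ofList (acc ++ (cs.drop k).takeWhile (fun c => !isDelim c)) := by
  induction hn : cs.length - k generalizing k acc with
  | zero =>
    have hk : cs.length ≤ k := by omega
    rw [goA]
    rw [dif_neg (by exact_mod_cast Nat.not_lt.mpr hk)]
    rw [List.drop_eq_nil_of_le hk]
    simp
  | succ n ih =>
    have hk : k < cs.length := by omega
    rw [goA]
    rw [dif_pos (by exact_mod_cast hk)]
    rw [PySem.List.pyGet?_natCast, List.getElem?_eq_getElem hk]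
    simp only
    rw [List.drop_eq_getElem_cons hk, List.takeWhile_cons]
    by_cases hd : isDelim cs[k] = true
    · rw [if_pos ((mem_delims_iff _).mpr hd), hd]
      simp
    · rw [if_neg (fun hc => hd ((mem_delims_iff _).mp hc))]
      rw [Bool.not_eq_true] at hd
      rw [hd]
      have : (k : Int) + 1 = ((k + 1 : Nat) : Int) := by push_cast; ring
      rw [this, ih (k + 1) (acc ++ [cs[k]]) (by omega)]
      simp

-- A's loop from a negative position k - len, 0 ≤ k < len: wraps through the suffix
theorem goA_neg (cs : List Char) (k : Nat) (acc : List Char) (hk : k < cs.length) :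
    goA cs ((k : Int) - (cs.length : Int)) acc =
      if (cs.drop k).any isDelim then String.ofList (acc ++ (cs.drop k).takeWhile (fun c => !isDelim c))
      else goA cs 0 (acc ++ cs.drop k) := by
  induction hn : cs.length - k generalizing k acc with
  | zero => omega
  | succ n ih =>
    rw [goA]
    rw [dif_pos (by omega)]
    have hneg : (k : Int) - (cs.length : Int) = -(((cs.length - k : Nat) : Int)) := by
      push_cast [Nat.cast_sub (le_of_lt hk)]; ring
    rw [hneg, PySem.List.pyGet?_neg_natCast _ _ (by omega) (by omega)]
    have hkk : cs.length - (cs.length - k) = k := by omega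
    rw [hkk, List.getElem?_eq_getElem hk]
    simp only
    by_cases hd : isDelim cs[k] = true
    · rw [if_pos ((mem_delims_iff _).mpr hd)]
      rw [List.drop_eq_getElem_cons hk, List.any_cons, List.takeWhile_cons, hd]
      simp
    · rw [if_neg (fun hc => hd ((mem_delims_iff _).mp hc))]
      rw [Bool.not_eq_true] at hd
      have harith : -(((cs.length - k : Nat) : Int)) + 1 = ((k + 1 : Nat) : Int) - (cs.length : Int) := by
        push_cast [Nat.cast_sub (le_of_lt hk)]; ring
      rw [harith]
      by_cases hk1 : k + 1 < cs.length
      · rw [ih (k + 1) (acc ++ [cs[k]]) hk1 (by omega)]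
        rw [List.drop_eq_getElem_cons hk, List.any_cons, List.takeWhile_cons, hd]
        simp
      · have hlen : k + 1 = cs.length := by omega
        have hz : ((k + 1 : Nat) : Int) - (cs.length : Int) = 0 := by
          rw [hlen]; ring
        rw [hz]
        have hnil : cs.drop (k + 1) = [] := List.drop_eq_nil_of_le (by omega)
        rw [List.drop_eq_getElem_cons hk, hnil, List.any_cons, List.takeWhile_cons, hd]
        simp

theorem drop_min_self (cs : List Char) (k : Nat) : cs.drop (min k cs.length) = cs.drop k := by
  rcases le_total k cs.length with h | h
  · rw [min_eq_left h]
  · rw [min_eq_right h, List.drop_eq_nil_of_le h, List.drop_eq_nil_of_le (le_refl _)]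

theorem neg_tail (cs : List Char) (index : Int) (h0 : index < 0) (h1 : -(cs.length : Int) ≤ index) :
    PySem.List.slice cs (some index) none = cs.drop ((cs.length : Int) + index).toNat := by
  rw [PySem.List.slice_some_none]
  have hk : index = -(((-index).toNat : Nat) : Int) := by omega
  rw [hk, PySem.List.clampIdx_neg_natCast _ _ (by omega)]
  congr 1
  omega

-- ===== VERDICT (by name: the statement is the Claim_ definition above) =====
theorem get_full_right_number_spec : Claim_unchanged_get_full_right_number := by
  intro s index _hdom hpre hnd
  unfold Pre_get_full_right_number at hpre
  show goA s.toList index [] = get_full_right_number_alt s index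
  rw [altEq]
  by_cases hpos : 0 ≤ index
  · -- nonnegative index
    have hidx : index = ((index.toNat : Nat) : Int) := by omega
    rw [hidx, goA_nonneg]
    rw [PySem.List.slice_some_none, PySem.List.clampIdx_natCast, drop_min_self]
    simp
  · -- negative index, in range; ¬D_ gives: suffix has a delimiter, or the head is one
    have hneg : index < 0 := by omega
    set cs := s.toList with hcs
    have hlen : 1 ≤ cs.length := by omega
    set k : Nat := ((cs.length : Int) + index).toNat with hkdef
    have hk : k < cs.length := by omega
    have hki : (k : Int) - (cs.length : Int) = index := by omega
    rw [← hki, goA_neg cs k [] hk, hki, neg_tail cs index hneg hpre]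
    by_cases hany : (cs.drop k).any isDelim = true
    · rw [if_pos hany, ← hkdef]; simp
    · rw [if_neg (by simp [hany])]
      -- ¬D_ forces the head to be a delimiter
      have hall : (cs.drop k).all (fun c => !isDelim c) = true := by
        rw [List.all_eq_not_any_not]; simp [hany]
      have hnil' : cs ≠ [] := by intro h0; rw [h0] at hlen; simp at hlen
      have hhead : isDelim cs.headI = true := by
        by_contra hh
        rw [Bool.not_eq_true] at hh
        exact hnd ⟨hneg, by rw [← hcs]; exact hnil', hh, hall⟩
      have g0 : goA cs (0 : Int) ([] ++ cs.drop k) =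
          String.ofList (([] ++ cs.drop k) ++ (cs.drop 0).takeWhile (fun c => !isDelim c)) := by
        simpa using goA_nonneg cs 0 ([] ++ cs.drop k)
      rw [g0, List.drop_zero]
      have htwk : (cs.drop k).takeWhile (fun c => !isDelim c) = cs.drop k := by
        rw [List.takeWhile_eq_self_iff]
        intro x hx
        have := List.all_eq_true.mp hall x hx
        simpa using this
      have htw : cs.takeWhile (fun c => !isDelim c) = [] := by
        cases hc : cs with
        | nil => simp
        | cons c cs' =>
          rw [hc] at hhead
          simp only [List.headI] at hhead
          simp [hhead]
      rw [htw, htwk]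
      simp

set_option maxRecDepth 8192 in
theorem get_full_right_number_changed : Claim_changed_get_full_right_number := by
  unfold Claim_changed_get_full_right_number
  refine ⟨by decide, by decide, by decide, ?_, by decide, by decide⟩
  show goA "ab".toList (-2) [] = "abab"
  have h2 : "ab".toList.length = 2 := by decide
  have hA := goA_neg "ab".toList 0 [] (by omega)
  rw [h2] at hA
  norm_num at hA
  have h0 : goA "ab".toList (0 : Int) "ab".toList =
      String.ofList ("ab".toList ++ ("ab".toList.drop 0).takeWhile (fun c => !isDelim c)) := by
    simpa using goA_nonneg "ab".toList 0 "ab".toList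
  rw [hA, if_neg (by simp [isDelim]), h0]
  simp [isDelim]

theorem get_full_right_number_tight : Claim_exact_get_full_right_number := by
  intro s index _hdom hpre hd
  obtain ⟨hneg, hnil, hhead, hall⟩ := hd
  unfold Pre_get_full_right_number at hpre
  show goA s.toList index [] ≠ get_full_right_number_alt s index
  rw [altEq]
  set cs := s.toList with hcs
  have hlen : 1 ≤ cs.length := List.length_pos_iff.mpr hnil
  set k : Nat := ((cs.length : Int) + index).toNat with hkdef
  have hk : k < cs.length := by omega
  have hki : (k : Int) - (cs.length : Int) = index := by omega
  have hall' : ((cs.drop ((cs.length + index).toNat)).all (fun c => !isDelim c)) = true := hall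
  have hkk : ((cs.length + index).toNat) = k := by omega
  rw [hkk] at hall'
  have hany : (cs.drop k).any isDelim = false := by
    rw [← Bool.not_eq_true]
    intro hc
    obtain ⟨x, hx, hpx⟩ := List.any_eq_true.mp hc
    have := List.all_eq_true.mp hall' x hx
    simp [hpx] at this
  have g0 : goA cs (0 : Int) ([] ++ cs.drop k) =
      String.ofList (([] ++ cs.drop k) ++ (cs.drop 0).takeWhile (fun c => !isDelim c)) := by
    simpa using goA_nonneg cs 0 ([] ++ cs.drop k)
  rw [← hki, goA_neg cs k [] hk, if_neg (by simp [hany]), g0, hki, neg_tail cs index hneg hpre]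
  rw [List.drop_zero]
  have htwk : (cs.drop k).takeWhile (fun c => !isDelim c) = cs.drop k := by
    rw [List.takeWhile_eq_self_iff]
    intro x hx
    have := List.all_eq_true.mp hall' x hx
    simpa using this
  have htwc : ∃ c cs', cs.takeWhile (fun c => !isDelim c) = c :: cs' := by
    cases hc : cs with
    | nil => exact absurd hc hnil
    | cons c cs' =>
      rw [hc] at hhead
      simp only [List.headI] at hhead
      rw [List.takeWhile_cons]
      rw [hhead]
      exact ⟨c, _, rfl⟩
  obtain ⟨c, cs', htwc⟩ := htwc
  rw [htwc, ← hkk, hkk, htwk]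
  intro hcon
  have := congrArg String.toList hcon
  simp only [String.toList_ofList] at this
  have := congrArg List.length this
  simp at this
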